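-- pv_equiv track=rewrite | github.com/iZhang/Python | CS101_Eclipse/apt_positiveId/src/PositiveID.py | maximumFacts
-- ===== SOURCE A (Python) =====
-- def maximumFacts(suspects):
--     happymeal = [suspect.split(",") for suspect in suspects]
--
--     maximumFries = 0
--
--     for i in range(0, len(happymeal)):
--         for j in range(0,len(happymeal)):
--             if i != j:
--                 if maximumFries < len(set(happymeal[i]) & set(happymeal[j])):
--                     maximumFries = len(set(happymeal[i]) & set(happymeal[j]))
--
--     return maximumFries
-- ===== SOURCE B (Python) =====
-- def maximumFacts(suspects):
--     # Inverted index: fact -> indices of suspects that know it; then count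
--     # shared facts per pair by co-occurrence instead of intersecting every pair.
--     fact_sets = [set(suspect.split(",")) for suspect in suspects]
--     index = {}
--     for i, facts in enumerate(fact_sets):
--         for fact in facts:
--             index.setdefault(fact, []).append(i)
--     shared = {}
--     for ids in index.values():
--         for x in ids:
--             for y in ids:
--                 if x < y:
--                     shared[(x, y)] = shared.get((x, y), 0) + 1
--     return max(shared.values(), default=0)
-- ===== Notes on version B (the rewrite author's own statement) =====
-- stated objective: alternative
-- what changed: Replaces the all-pairs set-intersection double loop with an inverted index (fact -> suspect indices) and per-fact co-occurrence counting into a pair dict, returning the max pair count (0 if none); this touches only co-occurring pairs, which was much faster on sparse inputs in testing but is not asymptotically better on dense ones.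
import Mathlib
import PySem

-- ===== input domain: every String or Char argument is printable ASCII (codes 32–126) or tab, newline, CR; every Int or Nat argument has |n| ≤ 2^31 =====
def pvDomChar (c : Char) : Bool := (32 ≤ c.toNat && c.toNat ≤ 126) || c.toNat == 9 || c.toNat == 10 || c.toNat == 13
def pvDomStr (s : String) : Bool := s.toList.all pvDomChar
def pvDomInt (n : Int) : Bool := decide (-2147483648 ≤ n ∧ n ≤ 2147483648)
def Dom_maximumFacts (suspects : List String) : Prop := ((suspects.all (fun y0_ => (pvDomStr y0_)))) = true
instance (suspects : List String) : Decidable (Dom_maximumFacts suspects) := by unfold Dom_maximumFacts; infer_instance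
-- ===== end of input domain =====

-- B replaces A's all-pairs set-intersection double loop by an inverted index
-- (fact -> suspect indices) with per-fact pair-co-occurrence counting (a different algorithm
-- that touches only co-occurring pairs).

-- suspect.split(",") — the separator is the non-empty literal ",", so split? never returns none
def pvSplit (s : String) : List String := (PySem.Str.split? s ",").getD []

-- ===== PORT A =====
def maximumFacts (suspects : List String) : Int :=
  let happymeal := suspects.map (fun suspect => pvSplit suspect)
  (PySem.List.pyRange 0 (happymeal.length : Int) 1).foldl (fun maximumFries i =>
    (PySem.List.pyRange 0 (happymeal.length : Int) 1).foldl (fun maximumFries j =>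
      if i ≠ j then
        if maximumFries < PySem.Set.len (PySem.Set.inter (PySem.Set.ofList (PySem.List.pyGetD happymeal i [])) (PySem.Set.ofList (PySem.List.pyGetD happymeal j []))) then
          PySem.Set.len (PySem.Set.inter (PySem.Set.ofList (PySem.List.pyGetD happymeal i [])) (PySem.Set.ofList (PySem.List.pyGetD happymeal j [])))
        else maximumFries
      else maximumFries) maximumFries) 0

-- ===== PORT B =====
def maximumFacts_alt (suspects : List String) : Int :=
  let factSets : List (PySem.Set String) := suspects.map (fun suspect => PySem.Set.ofList (pvSplit suspect))
  -- index.setdefault(fact, []).append(i)  ==  index[fact] = index.get(fact, []) + [i]  ==  Dict.modify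
  let index : PySem.Dict String (List Int) :=
    (PySem.List.enumerate factSets).foldl (fun d p =>
      p.2.foldl (fun d fact => d.modify fact [] (fun v => v ++ [p.1])) d) PySem.Dict.empty
  let shared : PySem.Dict (Int × Int) Int :=
    index.values.foldl (fun c ids =>
      ids.foldl (fun c x =>
        ids.foldl (fun c y =>
          if x < y then c.insert (x, y) (c.getD (x, y) 0 + 1) else c) c) c) PySem.Dict.empty
  PySem.List.maxD shared.values (fun v => v) 0

-- ===== PRECONDITION & SPEC =====
def Spec_maximumFacts (suspects : List String) (out : Int) : Prop := out = maximumFacts_alt suspects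
instance (suspects : List String) (out : Int) : Decidable (Spec_maximumFacts suspects out) := by unfold Spec_maximumFacts; infer_instance

-- ===== CLAIM (what is proved, stated in full; the proofs are below) =====
def Claim_equal_maximumFacts : Prop := ∀ (suspects : List String), Dom_maximumFacts suspects → Spec_maximumFacts suspects (maximumFacts suspects)

-- ===== LEMMAS AND PROOFS =====

-- the deduplicated fact set of suspect i (as A reads it, by Python indexing)
def pvS (suspects : List String) (i : Int) : PySem.Set String :=
  PySem.Set.ofList (PySem.List.pyGetD (suspects.map pvSplit) i [])

-- the shared-fact count A compares, as an Int
def pvC (suspects : List String) (i j : Int) : Int :=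
  PySem.Set.len (PySem.Set.inter (pvS suspects i) (pvS suspects j))

def pvFS (suspects : List String) : List (PySem.Set String) :=
  suspects.map (fun suspect => PySem.Set.ofList (pvSplit suspect))

-- the (fact, suspect index) pairs, in B's traversal order
def pvPairsFI (suspects : List String) : List (String × Int) :=
  (PySem.List.enumerate (pvFS suspects)).flatMap (fun p => p.2.map (fun g => (g, p.1)))

def pvIdsOf (suspects : List String) (f : String) : List Int :=
  ((pvPairsFI suspects).filter (fun q => q.1 == f)).map (fun q => q.2)

def pvK (suspects : List String) : List String :=
  PySem.Set.ofList ((pvPairsFI suspects).map (fun q => q.1))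

def pvPairsOf (ids : List Int) : List (Int × Int) :=
  ids.flatMap (fun x => (ids.filter (fun y => decide (x < y))).map (fun y => (x, y)))

def pvFlatAll (suspects : List String) : List (Int × Int) :=
  (pvK suspects).flatMap (fun f => pvPairsOf (pvIdsOf suspects f))

-- A's candidate list: pvC i j over all ordered pairs i ≠ j
def pvLA (suspects : List String) : List Int :=
  (PySem.List.pyRange 0 (suspects.length : Int) 1).flatMap (fun i =>
    ((PySem.List.pyRange 0 (suspects.length : Int) 1).filter (fun j => decide (i ≠ j))).map (fun j => pvC suspects i j))

def pvIndex (suspects : List String) : PySem.Dict String (List Int) :=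
  (pvPairsFI suspects).foldl (fun d q => d.modify q.1 [] (fun v => v ++ [q.2])) PySem.Dict.empty

theorem pvA_eq_foldl_max (suspects : List String) :
    maximumFacts suspects = (pvLA suspects).foldl max 0 := by
  have hmax : ∀ mF x : Int, (if mF < x then x else mF) = max mF x := by
    intro mF x
    rw [max_def]
    split_ifs <;> omega
  unfold maximumFacts pvLA
  simp only [List.length_map]
  rw [List.foldl_flatMap]
  apply PySem.List.foldl_congr_mem'
  intro i _ mF
  show (PySem.List.pyRange 0 (suspects.length : Int) 1).foldl
      (fun mF j => if i ≠ j then (if mF < pvC suspects i j then pvC suspects i j else mF) else mF) mF = _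
  rw [PySem.List.foldl_ite_eq_foldl_filter (fun j => i ≠ j)
    (fun mF j => if mF < pvC suspects i j then pvC suspects i j else mF)]
  rw [List.foldl_map]
  simp only [hmax]

theorem pvB_eq_maxD (suspects : List String) :
    maximumFacts_alt suspects =
      PySem.List.maxD ((PySem.Set.ofList (pvFlatAll suspects)).map
        (fun k => ((pvFlatAll suspects).count k : Int))) (fun v => v) 0 := by
  have hidx : (PySem.List.enumerate (pvFS suspects)).foldl
      (fun d p => p.2.foldl (fun d fact => d.modify fact [] (fun v => v ++ [p.1])) d)
      PySem.Dict.empty = pvIndex suspects := by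
    unfold pvIndex pvPairsFI
    rw [List.foldl_flatMap]
    simp only [List.foldl_map]
  have hnd : (pvIndex suspects).keys.Nodup := by
    unfold pvIndex
    exact PySem.Dict.nodup_keys_foldl_modify_key _ (fun q : String × Int => q.1) []
      (fun d q v => v ++ [q.2]) _ (by simp)
  have hkeys : (pvIndex suspects).keys = pvK suspects := by
    unfold pvIndex pvK
    rw [PySem.Dict.keys_foldl_modify_key _ (fun q : String × Int => q.1) []
      (fun d q v => v ++ [q.2])]
    simp [PySem.Set.update_nil_left]
  have hgetD : ∀ f, (pvIndex suspects).getD f [] = pvIdsOf suspects f := by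
    intro f
    unfold pvIndex pvIdsOf
    rw [PySem.Dict.getD_foldl_modify_append]
    simp
  have hvals : (pvIndex suspects).values = (pvK suspects).map (fun f => pvIdsOf suspects f) := by
    rw [PySem.Dict.values_eq_map_keys _ hnd ([] : List Int), hkeys]
    exact List.map_congr_left (fun f _ => hgetD f)
  have hsh : ∀ (vals : List (List Int)),
      vals.foldl (fun c ids =>
        ids.foldl (fun c x =>
          ids.foldl (fun c y =>
            if x < y then c.insert (x, y) (c.getD (x, y) 0 + 1) else c) c) c)
        (PySem.Dict.empty : PySem.Dict (Int × Int) Int)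
      = PySem.Dict.counter (vals.flatMap pvPairsOf) := by
    intro vals
    rw [← PySem.Dict.foldl_insert_getD_add_one_eq_counter, List.foldl_flatMap]
    apply PySem.List.foldl_congr_mem'
    intro ids _ c
    unfold pvPairsOf
    rw [List.foldl_flatMap]
    apply PySem.List.foldl_congr_mem'
    intro x _ c
    rw [List.foldl_map]
    rw [PySem.List.foldl_ite_eq_foldl_filter (fun y => x < y)
      (fun (c : PySem.Dict (Int × Int) Int) (y : Int) => c.insert (x, y) (c.getD (x, y) 0 + 1))]
  have hcnt : (PySem.Dict.counter (pvFlatAll suspects)).values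
      = (PySem.Set.ofList (pvFlatAll suspects)).map (fun k => ((pvFlatAll suspects).count k : Int)) := by
    show (PySem.Dict.counter (pvFlatAll suspects)).items.map (fun x => x.2) = _
    rw [PySem.Dict.items_counter, List.map_map]
    rfl
  have hB : maximumFacts_alt suspects = PySem.List.maxD
      (((PySem.List.enumerate (pvFS suspects)).foldl
          (fun d p => p.2.foldl (fun d fact => d.modify fact [] (fun v => v ++ [p.1])) d)
          PySem.Dict.empty).values.foldl
        (fun c ids => ids.foldl (fun c x => ids.foldl (fun c y =>
          if x < y then c.insert (x, y) (c.getD (x, y) 0 + 1) else c) c) c)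
        PySem.Dict.empty).values (fun v => v) 0 := rfl
  rw [hB, hidx, hvals, hsh, List.flatMap_map]
  rw [show (pvK suspects).flatMap (fun f => pvPairsOf (pvIdsOf suspects f)) = pvFlatAll suspects from rfl]
  rw [hcnt]

theorem pvS_nat (suspects : List String) (k : Nat) (hk : k < suspects.length) :
    pvS suspects (k : Int) = PySem.Set.ofList (pvSplit suspects[k]) := by
  unfold pvS
  rw [PySem.List.pyGetD_natCast, List.getD_eq_getElem?_getD]
  simp [hk]

theorem pv_mem_idsOf (suspects : List String) (f : String) (i : Int) :
    i ∈ pvIdsOf suspects f ↔ ∃ k : Nat, k < suspects.length ∧ i = (k : Int) ∧ f ∈ pvS suspects (k : Int) := by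
  simp only [pvIdsOf, List.mem_map, List.mem_filter, pvPairsFI, List.mem_flatMap,
    PySem.List.mem_enumerate_iff, beq_iff_eq, pvFS, List.length_map]
  constructor
  · rintro ⟨⟨g, idx⟩, ⟨⟨p, ⟨k, hk, rfl⟩, hmem⟩, hf⟩, hi⟩
    simp only [List.getElem_map] at hmem
    obtain ⟨g', hg', hgp⟩ := hmem
    obtain ⟨rfl, rfl⟩ := Prod.mk.injEq .. ▸ hgp
    refine ⟨k, hk, by simpa using hi.symm, ?_⟩
    rw [pvS_nat suspects k hk]
    subst hf
    exact hg'
  · rintro ⟨k, hk, rfl, hf⟩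
    rw [pvS_nat suspects k hk] at hf
    exact ⟨(f, (k : Int)), ⟨⟨((k : Int), PySem.Set.ofList (pvSplit suspects[k])), ⟨k, hk, by simp⟩,
      by simpa using hf⟩, rfl⟩, rfl⟩

theorem pv_block (x : List String) (s : Int) (f : String) :
    ((x.map (fun g => (g, s))).filter (fun q => q.1 == f)).map (fun q => q.2)
      = List.replicate (x.count f) s := by
  induction x with
  | nil => simp
  | cons g t ih =>
    simp only [List.map_cons, List.filter_cons, List.count_cons]
    by_cases h : g = f
    · subst h
      simp [List.replicate_succ, ih]
    · simp [h, ih]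

theorem pv_aux_lb (L : List (PySem.Set String)) (s : Int) (f : String) (i : Int)
    (h : i ∈ (((PySem.List.enumerate L s).flatMap (fun p => p.2.map (fun g => (g, p.1)))).filter
      (fun q => q.1 == f)).map (fun q => q.2)) : s ≤ i := by
  simp only [List.mem_map, List.mem_filter, List.mem_flatMap, PySem.List.mem_enumerate_iff] at h
  obtain ⟨q, ⟨⟨p, ⟨k, hk, rfl⟩, hq⟩, _⟩, rfl⟩ := h
  obtain ⟨g, _, rfl⟩ := hq
  omega

theorem pv_aux_pairwise (f : String) : ∀ (L : List (PySem.Set String)) (s : Int),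
    (∀ t ∈ L, List.Nodup t) →
    ((((PySem.List.enumerate L s).flatMap (fun p => p.2.map (fun g => (g, p.1)))).filter
      (fun q => q.1 == f)).map (fun q => q.2)).Pairwise (· < ·) := by
  intro L
  induction L with
  | nil => intro s _; simp [PySem.List.enumerate_nil]
  | cons x t ih =>
    intro s hnd
    rw [PySem.List.enumerate_cons]
    simp only [List.flatMap_cons, List.filter_append, List.map_append]
    rw [pv_block]
    rw [List.pairwise_append]
    refine ⟨?_, ih (s + 1) (fun u hu => hnd u (List.mem_cons_of_mem _ hu)), ?_⟩
    · have hle : x.count f ≤ 1 :=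
        (List.nodup_iff_count_le_one.mp (hnd x List.mem_cons_self)) f
      rcases Nat.le_one_iff_eq_zero_or_eq_one.mp hle with h | h <;> simp [h]
    · intro a ha b hb
      have ha' : a = s := (List.eq_of_mem_replicate ha)
      have hb' : s + 1 ≤ b := pv_aux_lb t (s + 1) f b hb
      omega

theorem pv_nodup_idsOf (suspects : List String) (f : String) : (pvIdsOf suspects f).Nodup := by
  have hset : ∀ t ∈ pvFS suspects, List.Nodup t := by
    intro t ht
    simp only [pvFS, List.mem_map] at ht
    obtain ⟨s, _, rfl⟩ := ht
    exact PySem.Set.nodup_ofList _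
  exact (pv_aux_pairwise f (pvFS suspects) 0 hset).imp fun h => ne_of_lt h

theorem pv_mem_K (suspects : List String) (f : String) :
    f ∈ pvK suspects ↔ ∃ k : Nat, k < suspects.length ∧ f ∈ pvS suspects (k : Int) := by
  simp only [pvK, PySem.Set.mem_ofList, List.mem_map, pvPairsFI, List.mem_flatMap,
    PySem.List.mem_enumerate_iff, pvFS, List.length_map]
  constructor
  · rintro ⟨⟨g, idx⟩, ⟨p, ⟨k, hk, rfl⟩, hmem⟩, rfl⟩
    simp only [List.getElem_map] at hmem
    obtain ⟨g', hg', hgp⟩ := hmem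
    obtain ⟨rfl, rfl⟩ := Prod.mk.injEq .. ▸ hgp
    exact ⟨k, hk, by rw [pvS_nat suspects k hk]; exact hg'⟩
  · rintro ⟨k, hk, hf⟩
    rw [pvS_nat suspects k hk] at hf
    exact ⟨(f, (k : Int)), ⟨((k : Int), PySem.Set.ofList (pvSplit suspects[k])), ⟨k, hk, by simp⟩,
      by simpa using hf⟩, rfl⟩

theorem pv_sum_map_ite (l : List Int) (a : Int) (c : Nat) :
    (l.map (fun x => if x = a then c else 0)).sum = l.count a * c := by
  induction l with
  | nil => simp
  | cons x t ih =>
    simp only [List.map_cons, List.sum_cons, List.count_cons, ih, beq_iff_eq]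
    split_ifs with h <;> ring

theorem pv_count_map_pair (l : List Int) (x i j : Int) :
    ((l.map (fun y => (x, y))).count (i, j)) = if x = i then l.count j else 0 := by
  simp only [List.count, List.countP_map]
  split_ifs with hx
  · subst hx
    congr 1
    funext y
    simp [Prod.ext_iff]
  · apply List.countP_eq_zero.mpr
    intro y hy
    simp [Function.comp, Prod.ext_iff, hx]

theorem pv_count_pairsOf (ids : List Int) (hnd : ids.Nodup) (i j : Int) :
    (pvPairsOf ids).count (i, j) = if i ∈ ids ∧ j ∈ ids ∧ i < j then 1 else 0 := by
  unfold pvPairsOf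
  rw [List.count_flatMap]
  have hstep : ∀ x : Int,
      (List.count (i, j) ∘ fun x => (ids.filter (fun y => decide (x < y))).map (fun y => (x, y))) x
        = if x = i then (if i < j then ids.count j else 0) else 0 := by
    intro x
    simp only [Function.comp]
    rw [pv_count_map_pair]
    split_ifs with hx hij
    · subst hx
      exact List.count_filter (by simpa using hij)
    · subst hx
      apply List.count_eq_zero.mpr
      simp only [List.mem_filter, decide_eq_true_eq]
      exact fun h => hij h.2
    · rfl
  rw [List.map_congr_left (fun x _ => hstep x), pv_sum_map_ite]
  by_cases hi : i ∈ ids <;> by_cases hj : j ∈ ids <;> by_cases hij : i < j <;>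
    simp [hi, hj, hij, List.count_eq_one_of_mem hnd, List.count_eq_zero_of_not_mem]

theorem pv_count_flatAll (suspects : List String) (i j : Int)
    (hi : 0 ≤ i) (hi' : i < (suspects.length : Int)) (hj : 0 ≤ j) (hj' : j < (suspects.length : Int)) :
    ((pvFlatAll suspects).count (i, j) : Int) =
      if i < j then pvC suspects i j else 0 := by
  have hmem_ids : ∀ (z : Int) (f : String), 0 ≤ z → z < (suspects.length : Int) →
      (z ∈ pvIdsOf suspects f ↔ f ∈ pvS suspects z) := by
    intro z f hz hz'
    rw [pv_mem_idsOf]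
    constructor
    · rintro ⟨k, hk, rfl, hf⟩; exact hf
    · intro hf
      refine ⟨z.toNat, by omega, by omega, ?_⟩
      rwa [show ((z.toNat : Nat) : Int) = z by omega]
  unfold pvFlatAll
  rw [List.count_flatMap]
  have hstep : ∀ f : String,
      (List.count (i, j) ∘ fun f => pvPairsOf (pvIdsOf suspects f)) f
        = if (i ∈ pvIdsOf suspects f ∧ j ∈ pvIdsOf suspects f ∧ i < j) then 1 else 0 :=
    fun f => pv_count_pairsOf _ (pv_nodup_idsOf suspects f) i j
  rw [List.map_congr_left (fun f _ => hstep f)]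
  by_cases hij : i < j
  · simp only [hij, and_true]
    rw [show (fun f => if i ∈ pvIdsOf suspects f ∧ j ∈ pvIdsOf suspects f then (1 : Nat) else 0)
          = fun f => if (fun g => decide (g ∈ pvS suspects i ∧ g ∈ pvS suspects j)) f = true then 1 else 0 by
        funext f
        simp [hmem_ids i f hi hi', hmem_ids j f hj hj']]
    rw [PySem.List.sum_map_ite_one_zero_nat]
    rw [List.countP_eq_length_filter]
    simp only [if_true]
    have hndK : (pvK suspects).Nodup := by unfold pvK; exact PySem.Set.nodup_ofList _
    have hndS : (pvS suspects i).Nodup := PySem.Set.nodup_ofList _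
    unfold pvC PySem.Set.len
    congr 1
    apply List.Perm.length_eq
    rw [List.perm_ext_iff_of_nodup (hndK.filter _) (PySem.Set.nodup_inter _ _ hndS)]
    intro g
    simp only [List.mem_filter, PySem.Set.mem_inter, decide_eq_true_eq]
    constructor
    · rintro ⟨_, h⟩; exact h
    · rintro ⟨h1, h2⟩
      refine ⟨?_, h1, h2⟩
      exact (pv_mem_K suspects g).mpr ⟨i.toNat, by omega,
        by rwa [show ((i.toNat : Nat) : Int) = i by omega]⟩
  · simp [hij]

theorem pvC_symm (suspects : List String) (i j : Int) : pvC suspects i j = pvC suspects j i := by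
  have hnd : ∀ k : Int, (pvS suspects k).Nodup := fun k => PySem.Set.nodup_ofList _
  unfold pvC PySem.Set.len
  congr 1
  apply List.Perm.length_eq
  rw [List.perm_ext_iff_of_nodup (PySem.Set.nodup_inter _ _ (hnd i)) (PySem.Set.nodup_inter _ _ (hnd j))]
  intro a
  simp only [PySem.Set.mem_inter]
  exact and_comm

theorem pv_mem_LA (suspects : List String) (x : Int) :
    x ∈ pvLA suspects ↔ ∃ i j : Int, 0 ≤ i ∧ i < (suspects.length : Int) ∧ 0 ≤ j ∧ j < (suspects.length : Int) ∧ i ≠ j ∧ x = pvC suspects i j := by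
  simp only [pvLA, List.mem_flatMap, List.mem_map, List.mem_filter, PySem.List.mem_pyRange_one,
    decide_eq_true_eq]
  constructor
  · rintro ⟨i, ⟨hi0, hi1⟩, j, ⟨⟨hj0, hj1⟩, hne⟩, rfl⟩
    exact ⟨i, j, hi0, hi1, hj0, hj1, hne, rfl⟩
  · rintro ⟨i, j, hi0, hi1, hj0, hj1, hne, rfl⟩
    exact ⟨i, ⟨hi0, hi1⟩, j, ⟨⟨hj0, hj1⟩, hne⟩, rfl⟩

theorem pv_le_maxD (l : List Int) (x : Int) (hx : x ∈ l) : x ≤ PySem.List.maxD l (fun v => v) 0 := by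
  cases l with
  | nil => simp at hx
  | cons v t =>
    simp only [PySem.List.maxD, PySem.List.max?_id_cons, Option.getD_some]
    rcases List.mem_cons.mp hx with h | h
    · exact h ▸ (PySem.List.le_foldl_max t v).1
    · exact (PySem.List.le_foldl_max t v).2 x h

theorem pv_maxD_mem_or_zero (l : List Int) :
    PySem.List.maxD l (fun v => v) 0 = 0 ∨ PySem.List.maxD l (fun v => v) 0 ∈ l := by
  cases l with
  | nil => left; rfl
  | cons v t =>
    right
    simp only [PySem.List.maxD, PySem.List.max?_id_cons, Option.getD_some]
    rcases PySem.List.foldl_max_mem t v with h | h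
    · rw [h]; exact List.mem_cons_self
    · exact List.mem_cons_of_mem v h

-- ===== VERDICT (by name: the statement is the Claim_ definition above) =====
theorem maximumFacts_spec : Claim_equal_maximumFacts := by
  intro suspects _
  unfold Spec_maximumFacts
  rw [pvA_eq_foldl_max, pvB_eq_maxD]
  set VL := (PySem.Set.ofList (pvFlatAll suspects)).map
    (fun k => ((pvFlatAll suspects).count k : Int)) with hVL
  have hBnn : 0 ≤ PySem.List.maxD VL (fun v => v) 0 := by
    rcases pv_maxD_mem_or_zero VL with h0 | hm
    · rw [h0]
    · obtain ⟨k, _, hval⟩ := List.mem_map.mp hm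
      rw [← hval]
      exact Int.natCast_nonneg _
  have main : ∀ a b : Int, 0 ≤ a → a < (suspects.length : Int) → 0 ≤ b →
      b < (suspects.length : Int) → a < b →
      pvC suspects a b ≤ PySem.List.maxD VL (fun v => v) 0 := by
    intro a b ha ha' hb hb' hab
    have hcnt := pv_count_flatAll suspects a b ha ha' hb hb'
    rw [if_pos hab] at hcnt
    by_cases hz : (pvFlatAll suspects).count (a, b) = 0
    · rw [← hcnt, hz]
      exact hBnn
    · have hmem : (a, b) ∈ pvFlatAll suspects := List.count_pos_iff.mp (Nat.pos_of_ne_zero hz)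
      have hv : (((pvFlatAll suspects).count (a, b) : Int)) ∈ VL :=
        List.mem_map.mpr ⟨(a, b), (PySem.Set.mem_ofList _ _).mpr hmem, rfl⟩
      rw [← hcnt]
      exact pv_le_maxD VL _ hv
  apply le_antisymm
  · rcases PySem.List.foldl_max_mem (pvLA suspects) 0 with h | h
    · rw [h]
      exact hBnn
    · obtain ⟨i, j, hi0, hi1, hj0, hj1, hne, hx⟩ := (pv_mem_LA suspects _).mp h
      rcases lt_trichotomy i j with hij | hij | hij
      · rw [hx]
        exact main i j hi0 hi1 hj0 hj1 hij
      · exact absurd hij hne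
      · rw [hx, pvC_symm]
        exact main j i hj0 hj1 hi0 hi1 hij
  · rcases pv_maxD_mem_or_zero VL with h0 | hm
    · rw [h0]
      exact (PySem.List.le_foldl_max (pvLA suspects) 0).1
    · obtain ⟨⟨i, j⟩, hk, hval⟩ := List.mem_map.mp hm
      have hmemflat : (i, j) ∈ pvFlatAll suspects := (PySem.Set.mem_ofList _ _).mp hk
      obtain ⟨f, hfK, hpair⟩ := List.mem_flatMap.mp hmemflat
      unfold pvPairsOf at hpair
      obtain ⟨x, hxmem, hmap⟩ := List.mem_flatMap.mp hpair
      obtain ⟨y, hyf, heq⟩ := List.mem_map.mp hmap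
      obtain ⟨hxi, hyj⟩ : x = i ∧ y = j := Prod.mk.injEq .. ▸ heq
      rw [hxi] at hxmem hyf
      rw [hyj] at hyf
      obtain ⟨hymem, hxy⟩ := List.mem_filter.mp hyf
      have hij : i < j := by simpa using hxy
      obtain ⟨ki, hki, hieq, _⟩ := (pv_mem_idsOf suspects f i).mp hxmem
      obtain ⟨kj, hkj, hjeq, _⟩ := (pv_mem_idsOf suspects f j).mp hymem
      have hi0 : 0 ≤ i := by omega
      have hi1 : i < (suspects.length : Int) := by omega
      have hj0 : 0 ≤ j := by omega
      have hj1 : j < (suspects.length : Int) := by omega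
      have hcnt := pv_count_flatAll suspects i j hi0 hi1 hj0 hj1
      rw [if_pos hij] at hcnt
      rw [← hval, hcnt]
      exact (PySem.List.le_foldl_max (pvLA suspects) 0).2 _
        ((pv_mem_LA suspects _).mpr ⟨i, j, hi0, hi1, hj0, hj1, ne_of_lt hij, rfl⟩)
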